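-- pv_equiv track=rewrite | github.com/Sebas9723-ops/Portfolio-Tracker-Investments | backend/app/services/exchange_classifier.py | get_exchange
-- ===== SOURCE A (Python) =====
-- _EU_SUFFIXES = {".DE", ".PA", ".AM", ".MI", ".BR", ".VI", ".MC"}
--
-- _UK_SUFFIXES = {".L", ".UK"}
--
-- _AU_SUFFIXES = {".AX"}
--
-- _OTHER_SUFFIXES = {".TO", ".HK", ".TW", ".KS", ".NS"}
--
-- _INDEX_PREFIXES = {"^"}
--
-- def get_exchange(ticker: str) -> str:
--     """Returns 'US', 'LSE', 'XETRA', 'EURONEXT', 'AU', or 'OTHER'."""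
--     upper = ticker.upper()
--     if any(upper.startswith(p) for p in _INDEX_PREFIXES):
--         return "INDEX"
--     for sfx in _EU_SUFFIXES:
--         if upper.endswith(sfx.upper()):
--             return "XETRA" if sfx == ".DE" else "EURONEXT"
--     for sfx in _UK_SUFFIXES:
--         if upper.endswith(sfx.upper()):
--             return "LSE"
--     for sfx in _AU_SUFFIXES:
--         if upper.endswith(sfx.upper()):
--             return "AU"
--     for sfx in _OTHER_SUFFIXES:
--         if upper.endswith(sfx.upper()):
--             return "OTHER"
--     return "US"
-- ===== SOURCE B (Python) =====
-- _SUFFIX3 = {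
--     ".DE": "XETRA", ".PA": "EURONEXT", ".AM": "EURONEXT", ".MI": "EURONEXT",
--     ".BR": "EURONEXT", ".VI": "EURONEXT", ".MC": "EURONEXT",
--     ".UK": "LSE", ".AX": "AU",
--     ".TO": "OTHER", ".HK": "OTHER", ".TW": "OTHER", ".KS": "OTHER", ".NS": "OTHER",
-- }
--
-- _SUFFIX2 = {".L": "LSE"}
--
-- def get_exchange(ticker: str) -> str:
--     """Returns 'US', 'LSE', 'XETRA', 'EURONEXT', 'AU', or 'OTHER'."""
--     upper = ticker.upper()
--     if upper.startswith("^"):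
--         return "INDEX"
--     return _SUFFIX3.get(upper[-3:]) or _SUFFIX2.get(upper[-2:]) or "US"
-- ===== Notes on version B (the rewrite author's own statement) =====
-- stated objective: simpler
-- what changed: Replaces the four suffix-scanning loops (with an inner XETRA/EURONEXT branch) by slicing the last three and last two characters once and looking each up in a precomputed suffix->exchange table.
import Mathlib
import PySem

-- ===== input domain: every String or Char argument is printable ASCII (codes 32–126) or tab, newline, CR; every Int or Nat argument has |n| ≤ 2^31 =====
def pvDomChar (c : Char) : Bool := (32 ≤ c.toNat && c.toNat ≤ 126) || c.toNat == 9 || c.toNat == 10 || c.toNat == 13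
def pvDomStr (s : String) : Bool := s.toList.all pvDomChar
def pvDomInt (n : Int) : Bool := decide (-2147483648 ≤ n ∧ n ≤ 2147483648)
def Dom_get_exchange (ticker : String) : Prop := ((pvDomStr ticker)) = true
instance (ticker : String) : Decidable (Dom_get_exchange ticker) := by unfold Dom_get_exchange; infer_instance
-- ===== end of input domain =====

-- B replaces A's four suffix-scanning loops by slicing the last 3 / last 2 characters once and
-- looking them up in a suffix->exchange table; objective: simpler.
-- Python iterates the suffix sets in hash order; the port fixes the source-literal order, which is
-- faithful because at most one suffix per loop can match (each loop's result is order-independent).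

-- ===== PORT A =====
-- one for-loop over a suffix list: first matching suffix yields `res sfx`
def pvScan (u : String) (res : String → String) : List String → Option String
  | [] => none
  | sfx :: rest =>
      if PySem.Str.endswith u (PySem.Str.upper sfx) then some (res sfx) else pvScan u res rest

def get_exchange (ticker : String) : String :=
  let upper := PySem.Str.upper ticker
  if PySem.Str.startswith upper "^" then "INDEX"
  else
    match pvScan upper (fun sfx => if sfx = ".DE" then "XETRA" else "EURONEXT")
        [".DE", ".PA", ".AM", ".MI", ".BR", ".VI", ".MC"] with
    | some r => r
    | none =>
      match pvScan upper (fun _ => "LSE") [".L", ".UK"] with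
      | some r => r
      | none =>
        match pvScan upper (fun _ => "AU") [".AX"] with
        | some r => r
        | none =>
          match pvScan upper (fun _ => "OTHER") [".TO", ".HK", ".TW", ".KS", ".NS"] with
          | some r => r
          | none => "US"

-- ===== PORT B =====
def pvSUFFIX3 : PySem.Dict String String :=
  PySem.Dict.ofList
    [(".DE", "XETRA"), (".PA", "EURONEXT"), (".AM", "EURONEXT"), (".MI", "EURONEXT"),
     (".BR", "EURONEXT"), (".VI", "EURONEXT"), (".MC", "EURONEXT"),
     (".UK", "LSE"), (".AX", "AU"),
     (".TO", "OTHER"), (".HK", "OTHER"), (".TW", "OTHER"), (".KS", "OTHER"), (".NS", "OTHER")]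

def pvSUFFIX2 : PySem.Dict String String := PySem.Dict.ofList [(".L", "LSE")]

def get_exchange_alt (ticker : String) : String :=
  let upper := PySem.Str.upper ticker
  if PySem.Str.startswith upper "^" then "INDEX"
  else
    match PySem.Dict.get? pvSUFFIX3 (PySem.Str.slice upper (some (-3)) none) with
    | some v => v
    | none =>
      match PySem.Dict.get? pvSUFFIX2 (PySem.Str.slice upper (some (-2)) none) with
      | some v => v
      | none => "US"

-- ===== PRECONDITION & SPEC =====
def Spec_get_exchange (ticker : String) (out : String) : Prop := out = get_exchange_alt ticker
instance (ticker : String) (out : String) : Decidable (Spec_get_exchange ticker out) := by unfold Spec_get_exchange; infer_instance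

-- ===== CLAIM (what is proved, stated in full; the proofs are below) =====
def Claim_equal_get_exchange : Prop := ∀ (ticker : String), Dom_get_exchange ticker → Spec_get_exchange ticker (get_exchange ticker)

-- ===== LEMMAS AND PROOFS =====

-- canonical form of A's suffix cascade, as a function of the last-3-chars list s3
def pvA (s3 : List Char) : String :=
  if s3 = ['.', 'D', 'E'] then "XETRA"
  else if s3 = ['.', 'P', 'A'] then "EURONEXT"
  else if s3 = ['.', 'A', 'M'] then "EURONEXT"
  else if s3 = ['.', 'M', 'I'] then "EURONEXT"
  else if s3 = ['.', 'B', 'R'] then "EURONEXT"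
  else if s3 = ['.', 'V', 'I'] then "EURONEXT"
  else if s3 = ['.', 'M', 'C'] then "EURONEXT"
  else if s3.drop (s3.length - 2) = ['.', 'L'] then "LSE"
  else if s3 = ['.', 'U', 'K'] then "LSE"
  else if s3 = ['.', 'A', 'X'] then "AU"
  else if s3 = ['.', 'T', 'O'] then "OTHER"
  else if s3 = ['.', 'H', 'K'] then "OTHER"
  else if s3 = ['.', 'T', 'W'] then "OTHER"
  else if s3 = ['.', 'K', 'S'] then "OTHER"
  else if s3 = ['.', 'N', 'S'] then "OTHER"
  else "US"

-- canonical form of B's two table lookups (conditions written key-first, as Dict.get? compares)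
def pvB (s3 : List Char) : String :=
  if ['.', 'D', 'E'] = s3 then "XETRA"
  else if ['.', 'P', 'A'] = s3 then "EURONEXT"
  else if ['.', 'A', 'M'] = s3 then "EURONEXT"
  else if ['.', 'M', 'I'] = s3 then "EURONEXT"
  else if ['.', 'B', 'R'] = s3 then "EURONEXT"
  else if ['.', 'V', 'I'] = s3 then "EURONEXT"
  else if ['.', 'M', 'C'] = s3 then "EURONEXT"
  else if ['.', 'U', 'K'] = s3 then "LSE"
  else if ['.', 'A', 'X'] = s3 then "AU"
  else if ['.', 'T', 'O'] = s3 then "OTHER"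
  else if ['.', 'H', 'K'] = s3 then "OTHER"
  else if ['.', 'T', 'W'] = s3 then "OTHER"
  else if ['.', 'K', 'S'] = s3 then "OTHER"
  else if ['.', 'N', 'S'] = s3 then "OTHER"
  else if ['.', 'L'] = s3.drop (s3.length - 2) then "LSE"
  else "US"

theorem pv_ends_eq (u t : String) :
    PySem.Str.endswith u t
      = (u.toList.drop (u.toList.length - t.toList.length) == t.toList) := by
  rw [Bool.eq_iff_iff, beq_iff_eq]
  rw [show PySem.Str.endswith u t = PySem.Chars.endswith u.toList t.toList from by simp]
  rw [PySem.Chars.endswith_iff, List.suffix_iff_eq_drop]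
  exact eq_comm

theorem pv_ends3 (u t : String) (h : t.toList.length = 3) :
    PySem.Str.endswith u t = (u.toList.drop (u.toList.length - 3) == t.toList) := by
  rw [pv_ends_eq, h]

theorem pv_ends2 (u t : String) (h : t.toList.length = 2) :
    PySem.Str.endswith u t = (u.toList.drop (u.toList.length - 2) == t.toList) := by
  rw [pv_ends_eq, h]

theorem pv_beq (s t : String) : (s == t) = (s.toList == t.toList) := by
  rw [Bool.eq_iff_iff, beq_iff_eq, beq_iff_eq]
  constructor
  · intro h; rw [h]
  · intro h; have := congrArg String.ofList h; simpa using this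

theorem pv_slice3 (u : String) :
    (PySem.Str.slice u (some (-3)) none).toList = u.toList.drop (u.toList.length - 3) := by
  rw [PySem.Str.toList_slice, PySem.Chars.slice_eq_listSlice,
    PySem.List.slice_from_neg_ofNat u.toList 3 (by omega)]

theorem pv_slice2 (u : String) :
    (PySem.Str.slice u (some (-2)) none).toList = u.toList.drop (u.toList.length - 2) := by
  rw [PySem.Str.toList_slice, PySem.Chars.slice_eq_listSlice,
    PySem.List.slice_from_neg_ofNat u.toList 2 (by omega)]

-- the length-2 tail is the tail of the length-3 tail
theorem pv_drop2_of_drop3 (l : List Char) :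
    l.drop (l.length - 2) = (l.drop (l.length - 3)).drop ((l.drop (l.length - 3)).length - 2) := by
  rw [List.drop_drop]
  congr 1
  simp only [List.length_drop]
  omega

-- unfold one step of A's loop under the surrounding match
theorem pv_match_scan (u : String) (res : String → String) (sfx : String) (rest : List String)
    (k : String) :
    (match pvScan u res (sfx :: rest) with | some r => r | none => k)
      = if PySem.Str.endswith u (PySem.Str.upper sfx) then res sfx
        else (match pvScan u res rest with | some r => r | none => k) := by
  simp only [pvScan]
  by_cases h : PySem.Str.endswith u (PySem.Str.upper sfx) = true
  · rw [if_pos h, if_pos h]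
  · rw [if_neg h, if_neg h]

theorem pv_match_scan_nil (u : String) (res : String → String) (k : String) :
    (match pvScan u res [] with | some r => r | none => k) = k := rfl

-- unfold one key of a dict lookup under the surrounding match
theorem pv_match_get (k v : String) (rest : List (String × String)) (x d : String) :
    (match PySem.Dict.get? (PySem.Dict.mk ((k, v) :: rest)) x with | some w => w | none => d)
      = if k == x then v
        else (match PySem.Dict.get? (PySem.Dict.mk rest) x with | some w => w | none => d) := by
  rw [PySem.Dict.get?_mk_cons]
  by_cases h : (k == x) = true
  · rw [if_pos h, if_pos h]
  · rw [if_neg h, if_neg h]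

theorem pv_match_get_nil (x d : String) :
    (match PySem.Dict.get? (PySem.Dict.mk ([] : List (String × String))) x with
      | some w => w | none => d) = d := rfl

set_option maxHeartbeats 1000000 in
theorem pv_A_char (u : String) :
    (match pvScan u (fun sfx => if sfx = ".DE" then "XETRA" else "EURONEXT")
        [".DE", ".PA", ".AM", ".MI", ".BR", ".VI", ".MC"] with
    | some r => r
    | none =>
      match pvScan u (fun _ => "LSE") [".L", ".UK"] with
      | some r => r
      | none =>
        match pvScan u (fun _ => "AU") [".AX"] with
        | some r => r
        | none =>
          match pvScan u (fun _ => "OTHER") [".TO", ".HK", ".TW", ".KS", ".NS"] with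
          | some r => r
          | none => "US")
      = pvA (u.toList.drop (u.toList.length - 3)) := by
  simp only [pv_match_scan, pv_match_scan_nil,
    show PySem.Str.upper ".DE" = ".DE" from by decide,
    show PySem.Str.upper ".PA" = ".PA" from by decide,
    show PySem.Str.upper ".AM" = ".AM" from by decide,
    show PySem.Str.upper ".MI" = ".MI" from by decide,
    show PySem.Str.upper ".BR" = ".BR" from by decide,
    show PySem.Str.upper ".VI" = ".VI" from by decide,
    show PySem.Str.upper ".MC" = ".MC" from by decide,
    show PySem.Str.upper ".L" = ".L" from by decide,
    show PySem.Str.upper ".UK" = ".UK" from by decide,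
    show PySem.Str.upper ".AX" = ".AX" from by decide,
    show PySem.Str.upper ".TO" = ".TO" from by decide,
    show PySem.Str.upper ".HK" = ".HK" from by decide,
    show PySem.Str.upper ".TW" = ".TW" from by decide,
    show PySem.Str.upper ".KS" = ".KS" from by decide,
    show PySem.Str.upper ".NS" = ".NS" from by decide,
    pv_ends3 u ".DE" (by decide), pv_ends3 u ".PA" (by decide), pv_ends3 u ".AM" (by decide),
    pv_ends3 u ".MI" (by decide), pv_ends3 u ".BR" (by decide), pv_ends3 u ".VI" (by decide),
    pv_ends3 u ".MC" (by decide), pv_ends2 u ".L" (by decide), pv_ends3 u ".UK" (by decide),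
    pv_ends3 u ".AX" (by decide), pv_ends3 u ".TO" (by decide), pv_ends3 u ".HK" (by decide),
    pv_ends3 u ".TW" (by decide), pv_ends3 u ".KS" (by decide), pv_ends3 u ".NS" (by decide)]
  rw [pv_drop2_of_drop3 u.toList]
  generalize u.toList.drop (u.toList.length - 3) = s3
  simp only [pvA, beq_iff_eq,
    show (".DE" : String).toList = ['.','D','E'] from by decide,
    show (".PA" : String).toList = ['.','P','A'] from by decide,
    show (".AM" : String).toList = ['.','A','M'] from by decide,
    show (".MI" : String).toList = ['.','M','I'] from by decide,
    show (".BR" : String).toList = ['.','B','R'] from by decide,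
    show (".VI" : String).toList = ['.','V','I'] from by decide,
    show (".MC" : String).toList = ['.','M','C'] from by decide,
    show (".UK" : String).toList = ['.','U','K'] from by decide,
    show (".AX" : String).toList = ['.','A','X'] from by decide,
    show (".TO" : String).toList = ['.','T','O'] from by decide,
    show (".HK" : String).toList = ['.','H','K'] from by decide,
    show (".TW" : String).toList = ['.','T','W'] from by decide,
    show (".KS" : String).toList = ['.','K','S'] from by decide,
    show (".NS" : String).toList = ['.','N','S'] from by decide,
    show (".L" : String).toList = ['.','L'] from by decide,
    show (if (".PA" : String) = ".DE" then "XETRA" else "EURONEXT") = "EURONEXT" from by simp,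
    show (if (".AM" : String) = ".DE" then "XETRA" else "EURONEXT") = "EURONEXT" from by simp,
    show (if (".MI" : String) = ".DE" then "XETRA" else "EURONEXT") = "EURONEXT" from by simp,
    show (if (".BR" : String) = ".DE" then "XETRA" else "EURONEXT") = "EURONEXT" from by simp,
    show (if (".VI" : String) = ".DE" then "XETRA" else "EURONEXT") = "EURONEXT" from by simp,
    show (if (".MC" : String) = ".DE" then "XETRA" else "EURONEXT") = "EURONEXT" from by simp]
  simp only [if_true]

set_option maxHeartbeats 1000000 in
theorem pv_B_char (u : String) :
    (match PySem.Dict.get? pvSUFFIX3 (PySem.Str.slice u (some (-3)) none) with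
    | some v => v
    | none =>
      match PySem.Dict.get? pvSUFFIX2 (PySem.Str.slice u (some (-2)) none) with
      | some v => v
      | none => "US")
      = pvB (u.toList.drop (u.toList.length - 3)) := by
  rw [show pvSUFFIX3 = PySem.Dict.mk
    [(".DE", "XETRA"), (".PA", "EURONEXT"), (".AM", "EURONEXT"), (".MI", "EURONEXT"),
     (".BR", "EURONEXT"), (".VI", "EURONEXT"), (".MC", "EURONEXT"),
     (".UK", "LSE"), (".AX", "AU"),
     (".TO", "OTHER"), (".HK", "OTHER"), (".TW", "OTHER"), (".KS", "OTHER"), (".NS", "OTHER")]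
      from by decide,
    show pvSUFFIX2 = PySem.Dict.mk [(".L", "LSE")] from by decide]
  simp only [pv_match_get, pv_match_get_nil, pv_beq, pv_slice3, pv_slice2, beq_iff_eq]
  rw [pv_drop2_of_drop3 u.toList]
  generalize u.toList.drop (u.toList.length - 3) = s3
  simp only [pvB,
    show (".DE" : String).toList = ['.','D','E'] from by decide,
    show (".PA" : String).toList = ['.','P','A'] from by decide,
    show (".AM" : String).toList = ['.','A','M'] from by decide,
    show (".MI" : String).toList = ['.','M','I'] from by decide,
    show (".BR" : String).toList = ['.','B','R'] from by decide,
    show (".VI" : String).toList = ['.','V','I'] from by decide,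
    show (".MC" : String).toList = ['.','M','C'] from by decide,
    show (".UK" : String).toList = ['.','U','K'] from by decide,
    show (".AX" : String).toList = ['.','A','X'] from by decide,
    show (".TO" : String).toList = ['.','T','O'] from by decide,
    show (".HK" : String).toList = ['.','H','K'] from by decide,
    show (".TW" : String).toList = ['.','T','W'] from by decide,
    show (".KS" : String).toList = ['.','K','S'] from by decide,
    show (".NS" : String).toList = ['.','N','S'] from by decide,
    show (".L" : String).toList = ['.','L'] from by decide]

set_option maxHeartbeats 1000000 in
theorem pv_tab_eq (s3 : List Char) : pvA s3 = pvB s3 := by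
  by_cases hDE : s3 = ['.', 'D', 'E']; · subst hDE; decide
  by_cases hPA : s3 = ['.', 'P', 'A']; · subst hPA; decide
  by_cases hAM : s3 = ['.', 'A', 'M']; · subst hAM; decide
  by_cases hMI : s3 = ['.', 'M', 'I']; · subst hMI; decide
  by_cases hBR : s3 = ['.', 'B', 'R']; · subst hBR; decide
  by_cases hVI : s3 = ['.', 'V', 'I']; · subst hVI; decide
  by_cases hMC : s3 = ['.', 'M', 'C']; · subst hMC; decide
  by_cases hUK : s3 = ['.', 'U', 'K']; · subst hUK; decide
  by_cases hAX : s3 = ['.', 'A', 'X']; · subst hAX; decide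
  by_cases hTO : s3 = ['.', 'T', 'O']; · subst hTO; decide
  by_cases hHK : s3 = ['.', 'H', 'K']; · subst hHK; decide
  by_cases hTW : s3 = ['.', 'T', 'W']; · subst hTW; decide
  by_cases hKS : s3 = ['.', 'K', 'S']; · subst hKS; decide
  by_cases hNS : s3 = ['.', 'N', 'S']; · subst hNS; decide
  by_cases hL : s3.drop (s3.length - 2) = ['.', 'L']
  · simp only [pvA, pvB, if_neg hDE, if_neg hPA, if_neg hAM, if_neg hMI, if_neg hBR, if_neg hVI,
      if_neg hMC, if_neg (Ne.symm hDE), if_neg (Ne.symm hPA), if_neg (Ne.symm hAM),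
      if_neg (Ne.symm hMI), if_neg (Ne.symm hBR), if_neg (Ne.symm hVI), if_neg (Ne.symm hMC),
      if_neg (Ne.symm hUK), if_neg (Ne.symm hAX), if_neg (Ne.symm hTO), if_neg (Ne.symm hHK),
      if_neg (Ne.symm hTW), if_neg (Ne.symm hKS), if_neg (Ne.symm hNS), if_pos hL,
      if_pos (Eq.symm hL)]
  · simp only [pvA, pvB, if_neg hDE, if_neg hPA, if_neg hAM, if_neg hMI, if_neg hBR, if_neg hVI,
      if_neg hMC, if_neg hUK, if_neg hAX, if_neg hTO, if_neg hHK, if_neg hTW, if_neg hKS,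
      if_neg hNS, if_neg (Ne.symm hDE), if_neg (Ne.symm hPA), if_neg (Ne.symm hAM),
      if_neg (Ne.symm hMI), if_neg (Ne.symm hBR), if_neg (Ne.symm hVI), if_neg (Ne.symm hMC),
      if_neg (Ne.symm hUK), if_neg (Ne.symm hAX), if_neg (Ne.symm hTO), if_neg (Ne.symm hHK),
      if_neg (Ne.symm hTW), if_neg (Ne.symm hKS), if_neg (Ne.symm hNS), if_neg hL,
      if_neg (Ne.symm hL)]

theorem pv_agree (ticker : String) : get_exchange ticker = get_exchange_alt ticker := by
  unfold get_exchange get_exchange_alt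
  by_cases hp : PySem.Str.startswith (PySem.Str.upper ticker) "^" = true
  · rw [if_pos hp, if_pos hp]
  · rw [if_neg hp, if_neg hp, pv_A_char, pv_B_char, pv_tab_eq]

-- ===== VERDICT (by name: the statement is the Claim_ definition above) =====
theorem get_exchange_spec : Claim_equal_get_exchange := by
  intro ticker _
  exact pv_agree ticker
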